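-- pv_equiv track=rewrite | github.com/liv0505/storage-net | topo_sim/traffic.py | _rotated_pair
-- ===== SOURCE A (Python) =====
-- from typing import Any, Mapping, Sequence
--
-- def _unique_exchange_ids(exchange_ids: Sequence[str]) -> list[str]:
--     seen: set[str] = set()
--     unique: list[str] = []
--     for exchange_id in exchange_ids:
--         if exchange_id in seen:
--             continue
--         seen.add(exchange_id)
--         unique.append(exchange_id)
--     return unique
--
-- def _rotated_pair(candidates: Sequence[str], seed: int, step: int | None = None) -> list[str]:
--     unique_candidates = _unique_exchange_ids(candidates)
--     if len(unique_candidates) <= 2: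
--         return unique_candidates[:2]
--
--     count = len(unique_candidates)
--     first_index = int(seed) % count
--     second_step = max(1, int(step if step is not None else count // 2))
--     indices = [first_index, (first_index + second_step) % count]
--     picked: list[str] = []
--     for index in [*indices, *range(count)]:
--         candidate = unique_candidates[index % count]
--         if candidate not in picked:
--             picked.append(candidate)
--         if len(picked) == 2:
--             break
--     return picked
-- ===== SOURCE B (Python) =====
-- def _rotated_pair(candidates, seed, step=None):
--     unique = list(dict.fromkeys(candidates))
--     if len(unique) <= 2:
--         return unique
--     count = len(unique)
--     idx1 = int(seed) % count
--     second_step = max(1, int(step if step is not None else count // 2))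
--     idx2 = (idx1 + second_step) % count
--     if idx2 == idx1:
--         idx2 = 1 if idx1 == 0 else 0
--     return [unique[idx1], unique[idx2]]
-- ===== Notes on version B (the rewrite author's own statement) =====
-- stated objective: simpler
-- what changed: Replaces A's membership-checked collection loop over [idx1, idx2, *range(count)] (with early break) by closed-form index arithmetic: the two picks are unique[idx1] and unique[idx2], with idx2 redirected to 0 (or 1 when idx1 == 0) on collision; the dedup uses dict.fromkeys.
import Mathlib
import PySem

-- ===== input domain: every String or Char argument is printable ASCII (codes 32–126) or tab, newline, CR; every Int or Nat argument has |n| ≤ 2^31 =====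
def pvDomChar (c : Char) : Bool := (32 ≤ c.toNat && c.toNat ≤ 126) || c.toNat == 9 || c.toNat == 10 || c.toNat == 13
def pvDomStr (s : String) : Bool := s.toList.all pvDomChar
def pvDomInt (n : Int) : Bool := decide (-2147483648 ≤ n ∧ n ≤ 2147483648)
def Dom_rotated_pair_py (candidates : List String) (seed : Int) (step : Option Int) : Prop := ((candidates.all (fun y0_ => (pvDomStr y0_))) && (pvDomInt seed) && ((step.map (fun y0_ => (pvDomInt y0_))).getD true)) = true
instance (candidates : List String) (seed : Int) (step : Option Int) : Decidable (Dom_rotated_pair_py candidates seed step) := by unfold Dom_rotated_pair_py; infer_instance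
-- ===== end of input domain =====

-- B replaces A's membership-checked collection loop over [idx1, idx2, *range(count)] by direct
-- index arithmetic computing the two picks in closed form (objective: simpler).

-- ===== PORT A =====
-- _unique_exchange_ids: loop with a 'seen' set and a 'unique' accumulator
def pvUniqueLoop (xs : List String) (seen : PySem.Set String) (unique : List String) : List String :=
  match xs with
  | [] => unique
  | x :: rest =>
      if PySem.Set.contains seen x then pvUniqueLoop rest seen unique
      else pvUniqueLoop rest (PySem.Set.add seen x) (unique ++ [x])

-- the 'for index in [*indices, *range(count)]' loop with early break at len(picked) == 2;
-- the index 'index % count' is always in range (0 < count), so pyGetD's default is never read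
def pvPickLoop (u : List String) (count : Int) (idxs : List Int) (picked : List String) : List String :=
  match idxs with
  | [] => picked
  | i :: rest =>
      let candidate := PySem.List.pyGetD u (PySem.Int.mod i count) ""
      let picked' := if candidate ∈ picked then picked else picked ++ [candidate]
      if picked'.length = 2 then picked' else pvPickLoop u count rest picked'

def rotated_pair_py (candidates : List String) (seed : Int) (step : Option Int) : List String :=
  let unique_candidates := pvUniqueLoop candidates PySem.Set.empty []
  if unique_candidates.length ≤ 2 then PySem.List.slice unique_candidates none (some 2)
  else
    let count : Int := unique_candidates.length
    let first_index := PySem.Int.mod seed count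
    let second_step := max 1 (step.getD (PySem.Int.floordiv count 2))
    let indices := [first_index, PySem.Int.mod (first_index + second_step) count]
    pvPickLoop unique_candidates count (indices ++ PySem.List.pyRange 0 count 1) []

-- ===== PORT B =====
def rotated_pair_py_alt (candidates : List String) (seed : Int) (step : Option Int) : List String :=
  let unique := PySem.List.dedup candidates
  if unique.length ≤ 2 then unique
  else
    let count : Int := unique.length
    let idx1 := PySem.Int.mod seed count
    let second_step := max 1 (step.getD (PySem.Int.floordiv count 2))
    let idx2 := PySem.Int.mod (idx1 + second_step) count
    let idx2' := if idx2 = idx1 then (if idx1 = 0 then 1 else 0) else idx2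
    [PySem.List.pyGetD unique idx1 "", PySem.List.pyGetD unique idx2' ""]

-- ===== PRECONDITION & SPEC =====
def Spec_rotated_pair_py (candidates : List String) (seed : Int) (step : Option Int) (out : List String) : Prop := out = rotated_pair_py_alt candidates seed step
instance (candidates : List String) (seed : Int) (step : Option Int) (out : List String) : Decidable (Spec_rotated_pair_py candidates seed step out) := by unfold Spec_rotated_pair_py; infer_instance

-- ===== CLAIM (what is proved, stated in full; the proofs are below) =====
def Claim_equal_rotated_pair_py : Prop := ∀ (candidates : List String) (seed : Int) (step : Option Int), Dom_rotated_pair_py candidates seed step → Spec_rotated_pair_py candidates seed step (rotated_pair_py candidates seed step)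

-- ===== LEMMAS AND PROOFS =====

-- A's seen/unique loop is the fold of Set.add, provided seen and unique have the same members
theorem pvUniqueLoop_eq (xs : List String) (seen : PySem.Set String) (unique : List String)
    (h : ∀ x, (x ∈ seen ↔ x ∈ unique)) :
    pvUniqueLoop xs seen unique = xs.foldl PySem.Set.add unique := by
  induction xs generalizing seen unique with
  | nil => simp [pvUniqueLoop]
  | cons x rest ih =>
      by_cases hx : x ∈ unique
      · have hin : x ∈ seen := (h x).mpr hx
        have ha : PySem.Set.add unique x = unique := by simp [PySem.Set.add, hx]
        simp [pvUniqueLoop, hin, List.foldl_cons, ha]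
        exact ih seen unique h
      · have hnin : x ∉ seen := fun hcon => hx ((h x).mp hcon)
        have ha : PySem.Set.add unique x = unique ++ [x] := by simp [PySem.Set.add, hx]
        simp only [pvUniqueLoop, PySem.Set.contains_eq_listContains, List.contains_eq_mem,
          decide_eq_true_eq]
        rw [if_neg hnin, List.foldl_cons, ha]
        exact ih _ _ (by
          intro y
          constructor
          · intro hy
            rcases (PySem.Set.mem_add seen x y).mp hy with h' | h'
            · exact List.mem_append_left _ ((h y).mp h')
            · simp [h']
          · intro hy
            rcases List.mem_append.mp hy with h' | h'
            · exact (PySem.Set.mem_add seen x y).mpr (Or.inl ((h y).mpr h'))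
            · exact (PySem.Set.mem_add seen x y).mpr (Or.inr (by simpa using h')))

theorem pvUniqueLoop_eq_dedup (xs : List String) :
    pvUniqueLoop xs PySem.Set.empty [] = PySem.List.dedup xs := by
  rw [pvUniqueLoop_eq xs PySem.Set.empty [] (by intro x; simp [PySem.Set.empty])]
  rw [PySem.List.dedup_eq_ofList, PySem.Set.ofList_eq_foldl]

theorem pvMod_self (i b : Int) (h0 : 0 ≤ i) (hb : i < b) : PySem.Int.mod i b = i := by
  rw [PySem.Int.mod_eq_emod_of_pos (lt_of_le_of_lt h0 hb)]
  exact Int.emod_eq_of_lt h0 hb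

-- the collection loop of A, in closed form (u duplicate-free, indices already reduced mod count)
theorem pvPickLoop_closed (u : List String) (hnd : u.Nodup) (hlen : 2 < u.length)
    (i1 i2 : Int) (h1 : 0 ≤ i1) (h1' : i1 < (u.length : Int))
    (h2 : 0 ≤ i2) (h2' : i2 < (u.length : Int)) :
    pvPickLoop u (u.length : Int) (i1 :: i2 :: PySem.List.pyRange 0 (u.length : Int) 1) []
      = [PySem.List.pyGetD u i1 "", PySem.List.pyGetD u (if i2 = i1 then (if i1 = 0 then 1 else 0) else i2) ""] := by
  have hc0 : (0 : Int) < (u.length : Int) := by exact_mod_cast Nat.lt_of_lt_of_le (by omega) (le_of_lt hlen)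
  have hinj : ∀ a b : Int, 0 ≤ a → a < (u.length : Int) → 0 ≤ b → b < (u.length : Int) →
      (PySem.List.pyGetD u a "" = PySem.List.pyGetD u b "" ↔ a = b) := by
    intro a b ha ha' hb hb'
    rw [PySem.List.pyGetD_eq_getElem u "" ha (by simpa using ha'),
        PySem.List.pyGetD_eq_getElem u "" hb (by simpa using hb')]
    constructor
    · intro h
      have := (List.Nodup.getElem_inj_iff hnd).mp h
      omega
    · intro h; subst h; rfl
  -- first iteration: picks u[i1]
  rw [show pvPickLoop u (u.length : Int) (i1 :: i2 :: PySem.List.pyRange 0 (u.length : Int) 1) []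
        = pvPickLoop u (u.length : Int) (i2 :: PySem.List.pyRange 0 (u.length : Int) 1)
            [PySem.List.pyGetD u i1 ""] from by
    simp only [pvPickLoop, pvMod_self i1 _ h1 h1']
    simp]
  by_cases heq : i2 = i1
  · -- second index collides; fall through to the range scan
    subst heq
    rw [show pvPickLoop u (u.length : Int) (i2 :: PySem.List.pyRange 0 (u.length : Int) 1)
          [PySem.List.pyGetD u i2 ""]
        = pvPickLoop u (u.length : Int) (PySem.List.pyRange 0 (u.length : Int) 1)
            [PySem.List.pyGetD u i2 ""] from by
      simp [pvPickLoop, pvMod_self i2 _ h2 h2']]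
    rw [PySem.List.pyRange_one_cons hc0]
    by_cases h10 : i2 = 0
    · subst h10
      rw [show (0 : Int) + 1 = 1 from rfl]
      rw [PySem.List.pyRange_one_cons (by omega)]
      -- index 0 is already picked, index 1 gives the second element
      have hm0 : PySem.Int.mod 0 ((u.length : Int)) = 0 := pvMod_self 0 _ (by omega) hc0
      have hm1 : PySem.Int.mod 1 ((u.length : Int)) = 1 := pvMod_self 1 _ (by omega) (by omega)
      simp only [pvPickLoop, hm0, hm1]
      have e1 : PySem.List.pyGetD u 1 "" ≠ PySem.List.pyGetD u 0 "" := by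
        intro hcon
        have := (hinj 1 0 (by omega) (by omega) (by omega) hc0).mp hcon
        omega
      simp [e1]
    · -- index 0 is new: second pick is u[0]
      have hm0 : PySem.Int.mod 0 ((u.length : Int)) = 0 := pvMod_self 0 _ (by omega) hc0
      simp only [pvPickLoop, hm0]
      have e0 : PySem.List.pyGetD u 0 "" ≠ PySem.List.pyGetD u i2 "" := by
        intro hcon
        have := (hinj 0 i2 (by omega) hc0 h2 h2').mp hcon
        omega
      simp [e0, h10]
  · -- distinct indices: second iteration completes the pair
    simp only [pvPickLoop, pvMod_self i2 _ h2 h2']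
    have e2 : PySem.List.pyGetD u i2 "" ≠ PySem.List.pyGetD u i1 "" := by
      intro hcon
      exact heq ((hinj i2 i1 h2 h2' h1 h1').mp hcon)
    simp [e2, heq]

-- ===== VERDICT (by name: the statement is the Claim_ definition above) =====
theorem rotated_pair_py_spec : Claim_equal_rotated_pair_py := by
  intro candidates seed step _
  unfold Spec_rotated_pair_py rotated_pair_py rotated_pair_py_alt
  rw [pvUniqueLoop_eq_dedup]
  set u := PySem.List.dedup candidates with hu
  have hnd : u.Nodup := by rw [hu, PySem.List.dedup_eq_ofList]; exact PySem.Set.nodup_ofList candidates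
  by_cases hle : u.length ≤ 2
  · simp only [hle, if_true]
    rw [PySem.List.slice_to _ (by omega)]
    exact List.take_of_length_le (by simpa using hle)
  · simp only [hle, if_false]
    have hlen : 2 < u.length := by omega
    have hc0 : (0 : Int) < (u.length : Int) := by exact_mod_cast Nat.lt_of_lt_of_le (by omega) (le_of_lt hlen)
    set i1 := PySem.Int.mod seed (u.length : Int) with hi1
    set s2 := max 1 (step.getD (PySem.Int.floordiv (u.length : Int) 2)) with hs2
    set i2 := PySem.Int.mod (i1 + s2) (u.length : Int) with hi2
    have h1 : 0 ≤ i1 := PySem.Int.mod_nonneg _ hc0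
    have h1' : i1 < (u.length : Int) := PySem.Int.mod_lt _ hc0
    have h2 : 0 ≤ i2 := PySem.Int.mod_nonneg _ hc0
    have h2' : i2 < (u.length : Int) := PySem.Int.mod_lt _ hc0
    simpa using pvPickLoop_closed u hnd hlen i1 i2 h1 h1' h2 h2'
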